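-- pv_equiv track=rewrite | github.com/DidierLeBail/Temporal-networks-PhD-code | libs/temporal_network.py | group_by_time
-- ===== SOURCE A (Python) =====
-- def group_by_time(t_ij):
-- 	r"""Compute `data_by_time`.
--
-- 	Parameters
-- 	----------
-- 	t_ij : array[int]
-- 		The data of pairwise interactions.
-- 		The time label should be in the first column, and should increase or stay constant from one row to the next.
--
-- 	Returns
-- 	-------
-- 	data_by_time : array[int]
-- 		Contains 2 columns, with `data_by_time[i] = [n_1, n_2]` with i the :math:`(i+1)^{\text{th}}` time appearing in `data`
-- 		n_1 the first line of occurrence of i and n_2 - 1 the last one.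
-- 	"""
-- 	data_by_time = []
-- 	n1 = 0; n_max = len(t_ij)
-- 	for n in range(1, n_max):
-- 		if t_ij[n][0] > t_ij[n-1][0]:
-- 			data_by_time.append([n1, n])
-- 			n1 = n
--
-- 	# take care of the last line of data
-- 	data_by_time.append([n1, n_max])
-- 	return data_by_time
-- ===== SOURCE B (Python) =====
-- def group_by_time(t_ij):
-- 	n = len(t_ij)
-- 	def runs(n1):
-- 		j = n1 + 1
-- 		while j < n and t_ij[j][0] <= t_ij[j - 1][0]:
-- 			j += 1
-- 		if j >= n:
-- 			return [[n1, n]]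
-- 		return [[n1, j]] + runs(j)
-- 	return runs(0)
-- ===== Notes on version B (the rewrite author's own statement) =====
-- stated objective: alternative
-- what changed: A's single index loop flagging increase boundaries with a running start variable is replaced by a recursive run-consumer: an inner while loop advances to the end of the current maximal non-increasing run, and an outer recursion emits one [start,end) pair per run.
import Mathlib
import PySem

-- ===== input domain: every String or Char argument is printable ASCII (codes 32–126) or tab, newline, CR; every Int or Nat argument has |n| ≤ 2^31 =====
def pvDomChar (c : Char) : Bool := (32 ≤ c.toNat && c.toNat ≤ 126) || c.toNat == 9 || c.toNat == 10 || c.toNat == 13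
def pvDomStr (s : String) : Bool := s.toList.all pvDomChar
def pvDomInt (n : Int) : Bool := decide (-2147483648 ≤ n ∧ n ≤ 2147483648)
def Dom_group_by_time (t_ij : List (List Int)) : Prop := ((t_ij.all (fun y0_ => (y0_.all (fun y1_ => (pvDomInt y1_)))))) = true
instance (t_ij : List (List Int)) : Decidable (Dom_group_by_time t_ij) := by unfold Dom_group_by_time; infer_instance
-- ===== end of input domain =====

-- B replaces A's boundary-flagging index loop by a recursive run-consumer: an inner while advances to the end of the current constant run, an outer recursion emits one [start,end) pair per run (alternative decomposition, same O(n) cost).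


-- ===== PORT A =====
def group_by_time (t_ij : List (List Int)) : List (List Int) :=
  let n_max : Int := t_ij.length
  let st :=
    (PySem.List.pyRange 1 n_max 1).foldl
      (fun (st : List (List Int) × Int) n =>
        if PySem.List.pyGetD (PySem.List.pyGetD t_ij n []) 0 0 >
           PySem.List.pyGetD (PySem.List.pyGetD t_ij (n - 1) []) 0 0 then
          (st.1 ++ [[st.2, n]], n)
        else st)
      ([], 0)
  st.1 ++ [[st.2, n_max]]

-- ===== PORT B =====
-- inner while loop of B: advance j while j < n and t_ij[j][0] <= t_ij[j-1][0]
def gbtAdvance (t_ij : List (List Int)) (n j : Int) : Int :=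
  if h : j < n ∧ PySem.List.pyGetD (PySem.List.pyGetD t_ij j []) 0 0 ≤
                 PySem.List.pyGetD (PySem.List.pyGetD t_ij (j - 1) []) 0 0 then
    gbtAdvance t_ij n (j + 1)
  else j
termination_by (n - j).toNat
decreasing_by omega

-- termination fact gbtRuns cites: the while loop never moves j backwards
theorem gbtAdvance_ge (t_ij : List (List Int)) (n j : Int) : j ≤ gbtAdvance t_ij n j := by
  fun_induction gbtAdvance <;> omega

-- outer recursion of B: emit the run starting at n1, recurse from its end
def gbtRuns (t_ij : List (List Int)) (n n1 : Int) : List (List Int) :=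
  let j := gbtAdvance t_ij n (n1 + 1)
  if n ≤ j then [[n1, n]]
  else [[n1, j]] ++ gbtRuns t_ij n j
termination_by (n - n1).toNat
decreasing_by have := gbtAdvance_ge t_ij n (n1 + 1); omega

def group_by_time_alt (t_ij : List (List Int)) : List (List Int) :=
  let n : Int := t_ij.length
  gbtRuns t_ij n 0

-- ===== PRECONDITION & SPEC =====
-- Pre_ excludes exactly the inputs where Python raises IndexError: an empty row is
-- subscripted with [0] whenever the list has at least two rows.
def Pre_group_by_time (t_ij : List (List Int)) : Prop :=
  2 ≤ t_ij.length → ∀ r ∈ t_ij, r ≠ []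
instance (t_ij : List (List Int)) : Decidable (Pre_group_by_time t_ij) := by unfold Pre_group_by_time; infer_instance
def pvWitness_group_by_time : List (List Int) := [[1, 2], [1, 5], [3, 0]]
def Spec_group_by_time (t_ij : List (List Int)) (out : List (List Int)) : Prop := out = group_by_time_alt t_ij
instance (t_ij : List (List Int)) (out : List (List Int)) : Decidable (Spec_group_by_time t_ij out) := by unfold Spec_group_by_time; infer_instance

-- ===== CLAIM (what is proved, stated in full; the proofs are below) =====
def Claim_equal_group_by_time : Prop := ∀ (t_ij : List (List Int)), Dom_group_by_time t_ij → Pre_group_by_time t_ij → Spec_group_by_time t_ij (group_by_time t_ij)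

-- ===== LEMMAS AND PROOFS =====

-- A's step function, named for the proofs
def gbtStep (t_ij : List (List Int)) : List (List Int) × Int → Int → List (List Int) × Int :=
  fun st n =>
    if PySem.List.pyGetD (PySem.List.pyGetD t_ij n []) 0 0 >
       PySem.List.pyGetD (PySem.List.pyGetD t_ij (n - 1) []) 0 0 then
      (st.1 ++ [[st.2, n]], n)
    else st

-- no index strictly between j and its advance is a cut point
theorem gbtAdvance_nocut (t_ij : List (List Int)) (n j : Int) :
    ∀ i, j ≤ i → i < gbtAdvance t_ij n j →
      ¬ (PySem.List.pyGetD (PySem.List.pyGetD t_ij i []) 0 0 >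
         PySem.List.pyGetD (PySem.List.pyGetD t_ij (i - 1) []) 0 0) := by
  fun_induction gbtAdvance with
  | case1 j h ih =>
      intro i hji hlt
      rcases eq_or_lt_of_le hji with rfl | hlt'
      · omega
      · exact ih i (by omega) hlt
  | case2 j h =>
      intro i hji hlt; omega

-- the while loop stops either at n or at a cut point
theorem gbtAdvance_stop (t_ij : List (List Int)) (n j : Int) :
    gbtAdvance t_ij n j < n →
      PySem.List.pyGetD (PySem.List.pyGetD t_ij (gbtAdvance t_ij n j) []) 0 0 >
      PySem.List.pyGetD (PySem.List.pyGetD t_ij (gbtAdvance t_ij n j - 1) []) 0 0 := by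
  fun_induction gbtAdvance with
  | case1 j h ih => exact ih
  | case2 j h => intro hlt; omega

-- folding A's step over a stretch with no cut point leaves the state unchanged
theorem foldl_gbtStep_id (t_ij : List (List Int)) :
    ∀ (L : List Int) (st : List (List Int) × Int),
      (∀ i ∈ L, ¬ (PySem.List.pyGetD (PySem.List.pyGetD t_ij i []) 0 0 >
                   PySem.List.pyGetD (PySem.List.pyGetD t_ij (i - 1) []) 0 0)) →
      L.foldl (gbtStep t_ij) st = st := by
  intro L
  induction L with
  | nil => intro st _; rfl
  | cons x L ih =>
      intro st hall
      have hx := hall x (by simp)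
      simp only [List.foldl_cons, gbtStep, if_neg hx]
      exact ih st (fun i hi => hall i (by simp [hi]))

-- bridge: A's fold from start index n1, closed by the final append, equals acc ++ B's runs
theorem fold_eq_runs (t_ij : List (List Int)) (n : Int) :
    ∀ (k : Nat) (n1 : Int) (acc : List (List Int)), (n - n1).toNat ≤ k →
      ((PySem.List.pyRange (n1 + 1) n 1).foldl (gbtStep t_ij) (acc, n1)).1 ++
        [[((PySem.List.pyRange (n1 + 1) n 1).foldl (gbtStep t_ij) (acc, n1)).2, n]] =
      acc ++ gbtRuns t_ij n n1 := by
  intro k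
  induction k with
  | zero =>
      intro n1 acc hk
      have hn : n ≤ n1 := by omega
      have hj := gbtAdvance_ge t_ij n (n1 + 1)
      rw [PySem.List.pyRange_one_eq_nil (by omega)]
      rw [gbtRuns]
      simp [if_pos (by omega : n ≤ gbtAdvance t_ij n (n1 + 1))]
  | succ k ih =>
      intro n1 acc hk
      have hj1 := gbtAdvance_ge t_ij n (n1 + 1)
      set j := gbtAdvance t_ij n (n1 + 1) with hjdef
      by_cases hnj : n ≤ j
      · -- last run: the whole remaining range has no cut point
        rw [gbtRuns]
        simp only [← hjdef, if_pos hnj]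
        have hid : (PySem.List.pyRange (n1 + 1) n 1).foldl (gbtStep t_ij) (acc, n1) = (acc, n1) := by
          apply foldl_gbtStep_id
          intro i hi
          rw [PySem.List.mem_pyRange_one] at hi
          exact gbtAdvance_nocut t_ij n (n1 + 1) i hi.1 (by omega)
        rw [hid]
      · -- a cut at j, then recurse
        rw [gbtRuns]
        simp only [← hjdef, if_neg (by omega : ¬ n ≤ j)]
        have hsplit : PySem.List.pyRange (n1 + 1) n 1 =
            PySem.List.pyRange (n1 + 1) j 1 ++ (j :: PySem.List.pyRange (j + 1) n 1) := by
          rw [PySem.List.pyRange_one_append (n1 + 1) j n (by omega) (by omega),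
              PySem.List.pyRange_one_cons (show j < n by omega)]
        rw [hsplit, List.foldl_append]
        have hid : (PySem.List.pyRange (n1 + 1) j 1).foldl (gbtStep t_ij) (acc, n1) = (acc, n1) := by
          apply foldl_gbtStep_id
          intro i hi
          rw [PySem.List.mem_pyRange_one] at hi
          exact gbtAdvance_nocut t_ij n (n1 + 1) i hi.1 hi.2
        rw [hid]
        have hcut := gbtAdvance_stop t_ij n (n1 + 1) (by omega)
        rw [← hjdef] at hcut
        simp only [List.foldl_cons, gbtStep, if_pos hcut]
        have := ih j (acc ++ [[n1, j]]) (by omega)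
        simp only [] at this
        rw [this]
        simp

-- ===== VERDICT (by name: the statement is the Claim_ definition above) =====
theorem group_by_time_spec : Claim_equal_group_by_time := by
  intro t_ij _ _
  unfold Spec_group_by_time group_by_time group_by_time_alt
  simpa [gbtStep] using fold_eq_runs t_ij (t_ij.length : Int) t_ij.length 0 [] (by omega)
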